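-- pv_equiv track=rewrite | github.com/DAL3131/python_2024_02 | day13/review.py | solution
-- ===== SOURCE A (Python) =====
-- def solution(x):
--     c = list(x)
--     newNumber = ""
--     for i,j in enumerate(c):
--         if len(c) - i > 4:
--             newNumber += "*"
--         else:
--             newNumber += j
--     return newNumber
-- ===== SOURCE B (Python) =====
-- def solution(x):
--     return "*" * (len(x) - 4) + x[-4:]
-- ===== Notes on version B (the rewrite author's own statement) =====
-- stated objective: simpler
-- what changed: Replaced the quadratic per-character enumerate/concatenation loop with a closed-form expression: string repetition for the masked prefix plus a slice for the last four characters.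
import Mathlib
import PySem

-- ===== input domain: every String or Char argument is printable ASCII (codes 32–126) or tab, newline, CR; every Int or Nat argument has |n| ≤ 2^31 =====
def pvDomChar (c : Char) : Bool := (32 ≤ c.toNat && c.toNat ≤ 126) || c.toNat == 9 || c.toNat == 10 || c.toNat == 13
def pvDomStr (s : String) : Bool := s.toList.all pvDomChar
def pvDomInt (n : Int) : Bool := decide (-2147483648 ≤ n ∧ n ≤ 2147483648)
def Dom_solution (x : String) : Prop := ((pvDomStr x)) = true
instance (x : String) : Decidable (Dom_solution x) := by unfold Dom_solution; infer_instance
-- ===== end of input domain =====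

-- B replaces A's per-character loop with a closed form: '*'-repetition plus the x[-4:] slice (simpler).

-- ===== PORT A =====
-- loop over enumerate(list(x)), appending '*' while more than 4 chars remain, else the char
def solution (x : String) : String :=
  let c := x.toList
  String.mk ((PySem.List.enumerate c).foldl
    (fun acc (ij : Int × Char) =>
      if (c.length : Int) - ij.1 > 4 then acc ++ ['*'] else acc ++ [ij.2]) [])

-- ===== PORT B =====
-- "*" * (len(x) - 4) + x[-4:]
def solution_alt (x : String) : String :=
  String.mk (PySem.List.pyRepeat ['*'] ((x.toList.length : Int) - 4)
    ++ PySem.List.slice x.toList (some (-4)) none)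

-- ===== PRECONDITION & SPEC =====
def Spec_solution (x : String) (out : String) : Prop := out = solution_alt x
instance (x : String) (out : String) : Decidable (Spec_solution x out) := by unfold Spec_solution; infer_instance

-- ===== CLAIM (what is proved, stated in full; the proofs are below) =====
def Claim_equal_solution : Prop := ∀ (x : String), Dom_solution x → Spec_solution x (solution x)

-- ===== LEMMAS AND PROOFS =====

-- A's loop only ever appends one element per step, so the fold is map plus the accumulator
lemma foldl_append_map {α β : Type} (g : α → β) (l : List α) (a : List β) :
    l.foldl (fun acc y => acc ++ [g y]) a = a ++ l.map g := by
  induction l generalizing a with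
  | nil => simp
  | cons h t ih => simp [List.foldl, ih]

lemma mask_map_eq (c : List Char) :
    (PySem.List.enumerate c).map
        (fun ij : Int × Char => if (c.length : Int) - ij.1 > 4 then '*' else ij.2)
      = List.replicate (c.length - 4) '*' ++ c.drop (c.length - 4) := by
  apply List.ext_getElem
  · simp [PySem.List.length_enumerate]
  · intro i h1 h2
    have hi : i < c.length := by simpa [PySem.List.length_enumerate] using h1
    rw [List.getElem_map, PySem.List.getElem_enumerate]
    by_cases hlt : i < c.length - 4
    · have : ((c.length : Int)) - ((0 : Int) + i) > 4 := by omega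
      rw [if_pos this, List.getElem_append_left (by simpa using hlt),
        List.getElem_replicate]
    · have : ¬ ((c.length : Int)) - ((0 : Int) + i) > 4 := by omega
      rw [if_neg this, List.getElem_append_right (by simpa using hlt)]
      simp [List.getElem_drop]
      congr 1
      omega

lemma main_eq (x : String) : solution x = solution_alt x := by
  simp only [solution, solution_alt]
  rw [PySem.List.slice_some_none]
  have hrep : PySem.List.pyRepeat ['*'] ((x.toList.length : Int) - 4)
      = List.replicate (x.toList.length - 4) '*' := by
    rw [PySem.List.pyRepeat_singleton]
    congr 1
    omega
  have hclamp : PySem.List.clampIdx x.toList.length (-4) = x.toList.length - 4 := by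
    unfold PySem.List.clampIdx
    split_ifs <;> omega
  rw [hrep, hclamp, show (fun (acc : List Char) (ij : Int × Char) =>
      if (x.toList.length : Int) - ij.1 > 4 then acc ++ ['*'] else acc ++ [ij.2])
    = fun acc ij => acc ++ [(fun ij : Int × Char =>
        if (x.toList.length : Int) - ij.1 > 4 then '*' else ij.2) ij] from by
      funext acc ij; simp only []; split <;> simp_all]
  rw [foldl_append_map, mask_map_eq]
  simp

-- ===== VERDICT (by name: the statement is the Claim_ definition above) =====
theorem solution_spec : Claim_equal_solution := by
  intro x _
  exact main_eq x
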